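-- pv_equiv track=rewrite | github.com/dmercier-mercurius/schedule_generate_oop | Shift_Functions.py | generate_targeted_random_shifts_to_add
-- ===== SOURCE A (Python) =====
-- def identify_day_with_least_shifts(total_shifts_per_day):
--     min_daily_shifts = 999999999
--
--     for day, num_of_shifts in total_shifts_per_day.items():
--         if num_of_shifts < min_daily_shifts:
--             min_daily_shifts = num_of_shifts
--             day_with_least_shifts = day
--
--     return day_with_least_shifts
--
-- def generate_targeted_random_shifts_to_add(shifts_to_add, total_shifts_per_day, daily_shifts):
--
--     # Track the number of potential shifts added on each day
--     potential_shifts_added = {}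
--
--     # Select existing shifts that are not mid-shifts as potential
--     for day, shifts in daily_shifts.items():
--         potential_shifts_added[day] = {}
--         for shift, quantity in shifts.items():
--             if quantity == 0 or 22 <= shift < 24 or 0 <= shift < 6:
--                 continue
--             else:
--                 potential_shifts_added[day][shift] = 0
--
--     while shifts_to_add > 0:
--         # identify day with least total shifts
--         day_to_add_shift = identify_day_with_least_shifts(total_shifts_per_day)
--
--         # Identify shift on day with fewest number of shifts added
--         min_number_of_shifts = 9999999999
--         for shift, quantity in potential_shifts_added[day_to_add_shift].items():
--             if quantity < min_number_of_shifts: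
--                 min_number_of_shifts = quantity
--                 shift_to_add = shift
--
--         # Add shift to daily shifts
--         daily_shifts[day_to_add_shift][shift_to_add] += 1
--         # Record that shift has been added
--         potential_shifts_added[day_to_add_shift][shift_to_add] += 1
--         # decrement number of shifts to add
--         shifts_to_add -= 1
--
--     return daily_shifts
-- ===== SOURCE B (Python) =====
-- def generate_targeted_random_shifts_to_add(shifts_to_add, total_shifts_per_day, daily_shifts):
--     if shifts_to_add <= 0:
--         return daily_shifts
--
--     # The least-loaded day never changes inside A's loop, so find it once.
--     day, _ = min(total_shifts_per_day.items(), key=lambda kv: kv[1])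
--
--     shifts = daily_shifts[day]
--     targets = [s for s, q in shifts.items()
--                if q != 0 and not 0 <= s < 6 and not 22 <= s < 24]
--
--     # Round-robin over `targets` in order: floor share + one extra for the first remainder shifts.
--     base, extra = divmod(shifts_to_add, len(targets))
--     for i, s in enumerate(targets):
--         shifts[s] += base + (1 if i < extra else 0)
--     return daily_shifts
-- ===== Notes on version B (the rewrite author's own statement) =====
-- stated objective: alternative
-- what changed: A re-finds the least-loaded day and rescans the candidate-shift counters once per shift added; since the day totals never change inside the loop, B finds the target day once and distributes all N shifts in closed form (floor share + one extra to the first N%S candidate shifts in order), removing the per-shift loop entirely (O(D+S) instead of O(N*(D+S))).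
import Mathlib
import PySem

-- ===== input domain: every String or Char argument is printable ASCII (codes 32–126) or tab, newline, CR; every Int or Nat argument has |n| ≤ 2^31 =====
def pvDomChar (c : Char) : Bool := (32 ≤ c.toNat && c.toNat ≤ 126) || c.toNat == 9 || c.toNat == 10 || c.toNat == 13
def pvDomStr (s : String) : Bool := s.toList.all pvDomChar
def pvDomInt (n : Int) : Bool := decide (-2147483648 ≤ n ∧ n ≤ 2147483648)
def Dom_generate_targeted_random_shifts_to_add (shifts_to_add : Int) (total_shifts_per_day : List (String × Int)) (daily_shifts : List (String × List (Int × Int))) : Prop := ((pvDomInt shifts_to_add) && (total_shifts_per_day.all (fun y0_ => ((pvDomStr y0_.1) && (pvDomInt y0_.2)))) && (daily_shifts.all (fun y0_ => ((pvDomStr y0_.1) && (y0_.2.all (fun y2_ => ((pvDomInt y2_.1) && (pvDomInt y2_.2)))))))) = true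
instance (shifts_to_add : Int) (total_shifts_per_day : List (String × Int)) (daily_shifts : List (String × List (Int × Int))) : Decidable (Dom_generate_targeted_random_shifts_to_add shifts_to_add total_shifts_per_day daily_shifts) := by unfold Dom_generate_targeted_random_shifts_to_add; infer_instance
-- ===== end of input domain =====

-- B finds the least-loaded day once (it never changes inside A's loop) and distributes the
-- N shifts in closed form instead of one at a time; both mutate `daily_shifts` in place in
-- Python — the equivalence proved here is about the returned value.

-- Shared association-list helpers (Python dict: first-match lookup / in-place value update).
def alGet? {κ ν : Type} [BEq κ] : List (κ × ν) → κ → Option ν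
  | [], _ => none
  | p :: t, k => if p.1 == k then some p.2 else alGet? t k

def bump {κ ν : Type} [BEq κ] : List (κ × ν) → κ → (ν → ν) → List (κ × ν)
  | [], _, _ => []
  | p :: t, k, f => if p.1 == k then (p.1, f p.2) :: t else p :: bump t k f

-- ===== PORT A =====
-- identify_day_with_least_shifts: running-minimum scan with sentinel 999999999.
def leastDayA (total : List (String × Int)) : Option String :=
  (total.foldl (fun (st : Int × Option String) p =>
      if p.2 < st.1 then (p.2, some p.1) else st) ((999999999 : Int), none)).2

-- the inner `for shift, quantity` loop building potential_shifts_added[day]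
def potentialOf (shifts : List (Int × Int)) : List (Int × Int) :=
  shifts.foldl (fun acc sq =>
    if sq.2 == 0 || (22 ≤ sq.1 && sq.1 < 24) || (0 ≤ sq.1 && sq.1 < 6)
    then acc else acc ++ [(sq.1, 0)]) []

-- the argmin-shift scan with sentinel 9999999999
def leastShiftA (pot : List (Int × Int)) : Option Int :=
  (pot.foldl (fun (st : Int × Option Int) p =>
      if p.2 < st.1 then (p.2, some p.1) else st) ((9999999999 : Int), none)).2

-- the while loop, one recursive step per shift added (fuel = shifts_to_add.toNat);
-- the `none` fallbacks are the KeyError/UnboundLocalError points, excluded by Pre_.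
def loopA (total : List (String × Int)) :
    Nat → List (String × List (Int × Int)) → List (String × List (Int × Int)) →
    List (String × List (Int × Int))
  | 0, ds, _ => ds
  | n + 1, ds, pot =>
    match leastDayA total with
    | none => ds
    | some d =>
      match leastShiftA ((alGet? pot d).getD []) with
      | none => ds
      | some s =>
        loopA total n (bump ds d (fun sh => bump sh s (· + 1)))
          (bump pot d (fun sh => bump sh s (· + 1)))

def generate_targeted_random_shifts_to_add (shifts_to_add : Int) (total_shifts_per_day : List (String × Int)) (daily_shifts : List (String × List (Int × Int))) : List (String × List (Int × Int)) :=
  loopA total_shifts_per_day shifts_to_add.toNat daily_shifts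
    (daily_shifts.foldl (fun acc p => acc ++ [(p.1, potentialOf p.2)]) [])

-- ===== PORT B =====
def generate_targeted_random_shifts_to_add_alt (shifts_to_add : Int) (total_shifts_per_day : List (String × Int)) (daily_shifts : List (String × List (Int × Int))) : List (String × List (Int × Int)) :=
  if shifts_to_add ≤ 0 then daily_shifts else
  match PySem.List.min? total_shifts_per_day (fun kv => kv.2) with
  | none => daily_shifts   -- min() of an empty dict: ValueError, excluded by Pre_
  | some dm =>
    let shifts := (alGet? daily_shifts dm.1).getD []   -- KeyError excluded by Pre_
    let targets := (shifts.filter (fun sq =>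
        decide (sq.2 ≠ 0 ∧ ¬(0 ≤ sq.1 ∧ sq.1 < 6) ∧ ¬(22 ≤ sq.1 ∧ sq.1 < 24)))).map (·.1)
    let base := PySem.Int.floordiv shifts_to_add targets.length
    let extra := PySem.Int.mod shifts_to_add targets.length
    bump daily_shifts dm.1 (fun sh =>
      (PySem.List.enumerate targets 0).foldl (fun sh p =>
        bump sh p.2 (fun v => v + (base + if p.1 < extra then 1 else 0))) sh)

-- ===== PRECONDITION & SPEC =====
-- the filter predicate B uses (a usable, non-mid, non-empty shift)
def usable (sq : Int × Int) : Bool :=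
  decide (sq.2 ≠ 0 ∧ ¬(0 ≤ sq.1 ∧ sq.1 < 6) ∧ ¬(22 ≤ sq.1 ∧ sq.1 < 24))

-- Pre_ excludes (a) inputs where A raises: nothing to add is fine, otherwise the day totals
-- must be nonempty with some total below A's sentinel 999999999 (else UnboundLocalError),
-- the least-loaded day must be a key of daily_shifts (else KeyError) with at least one
-- usable shift (else UnboundLocalError / B's ZeroDivisionError); and (b) association lists
-- with duplicate keys, which do not arise from a Python dict.
def Pre_generate_targeted_random_shifts_to_add (shifts_to_add : Int) (total_shifts_per_day : List (String × Int)) (daily_shifts : List (String × List (Int × Int))) : Prop :=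
  shifts_to_add ≤ 0 ∨
  ((total_shifts_per_day.map Prod.fst).Nodup ∧
   (daily_shifts.map Prod.fst).Nodup ∧
   (∀ p ∈ daily_shifts, (p.2.map Prod.fst).Nodup) ∧
   (∃ p ∈ total_shifts_per_day, p.2 < 999999999) ∧
   (∃ q ∈ daily_shifts,
      some q.1 = (PySem.List.min? total_shifts_per_day (fun kv => kv.2)).map Prod.fst ∧
      q.2.filter usable ≠ []))
instance (shifts_to_add : Int) (total_shifts_per_day : List (String × Int)) (daily_shifts : List (String × List (Int × Int))) : Decidable (Pre_generate_targeted_random_shifts_to_add shifts_to_add total_shifts_per_day daily_shifts) := by unfold Pre_generate_targeted_random_shifts_to_add; infer_instance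

def pvWitness_generate_targeted_random_shifts_to_add : Int × (List (String × Int)) × (List (String × List (Int × Int))) :=
  (3, [("mon", 4), ("tue", 2)], [("mon", [(10, 1)]), ("tue", [(0, 2), (10, 1), (12, 1)])])

def Spec_generate_targeted_random_shifts_to_add (shifts_to_add : Int) (total_shifts_per_day : List (String × Int)) (daily_shifts : List (String × List (Int × Int))) (out : List (String × List (Int × Int))) : Prop := out = generate_targeted_random_shifts_to_add_alt shifts_to_add total_shifts_per_day daily_shifts
instance (shifts_to_add : Int) (total_shifts_per_day : List (String × Int)) (daily_shifts : List (String × List (Int × Int))) (out : List (String × List (Int × Int))) : Decidable (Spec_generate_targeted_random_shifts_to_add shifts_to_add total_shifts_per_day daily_shifts out) := by unfold Spec_generate_targeted_random_shifts_to_add; infer_instance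

-- ===== CLAIM (what is proved, stated in full; the proofs are below) =====
def Claim_equal_generate_targeted_random_shifts_to_add : Prop := ∀ (shifts_to_add : Int) (total_shifts_per_day : List (String × Int)) (daily_shifts : List (String × List (Int × Int))), Dom_generate_targeted_random_shifts_to_add shifts_to_add total_shifts_per_day daily_shifts → Pre_generate_targeted_random_shifts_to_add shifts_to_add total_shifts_per_day daily_shifts → Spec_generate_targeted_random_shifts_to_add shifts_to_add total_shifts_per_day daily_shifts (generate_targeted_random_shifts_to_add shifts_to_add total_shifts_per_day daily_shifts)

-- ===== LEMMAS AND PROOFS =====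

-- ---------- association-list lemmas ----------

theorem alGet?_eq_of_mem_nodup {κ ν : Type} [BEq κ] [LawfulBEq κ] {l : List (κ × ν)}
    (hnd : (l.map Prod.fst).Nodup) {k : κ} {v : ν} (h : (k, v) ∈ l) : alGet? l k = some v := by
  induction l with
  | nil => simp at h
  | cons p t ih =>
    simp only [List.map_cons, List.nodup_cons] at hnd
    rcases List.mem_cons.mp h with he | ht
    · rw [← he]
      simp [alGet?]
    · have hne : ¬ p.1 = k := by
        intro e
        apply hnd.1
        rw [e]
        exact List.mem_map_of_mem (f := Prod.fst) ht
      simp [alGet?, hne, ih hnd.2 ht]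

theorem alGet?_map {κ ν μ : Type} [BEq κ] (l : List (κ × ν)) (g : ν → μ) (k : κ) :
    alGet? (l.map (fun p => (p.1, g p.2))) k = (alGet? l k).map g := by
  induction l with
  | nil => rfl
  | cons p t ih =>
    by_cases hp : (p.1 == k) = true
    · simp [alGet?, hp]
    · simp only [List.map_cons]
      rw [show (alGet? (((p.1, g p.2)) :: t.map (fun p => (p.1, g p.2))) k) =
          alGet? (t.map (fun p => (p.1, g p.2))) k from by
            simp [alGet?, hp],
        show alGet? (p :: t) k = alGet? t k from by simp [alGet?, hp], ih]

theorem alGet?_bump_self {κ ν : Type} [BEq κ] [LawfulBEq κ] (l : List (κ × ν)) (k : κ) (f : ν → ν) :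
    alGet? (bump l k f) k = (alGet? l k).map f := by
  induction l with
  | nil => rfl
  | cons p t ih =>
    by_cases hp : p.1 = k
    · simp [bump, alGet?, hp]
    · simp [bump, alGet?, hp, ih]

theorem keys_bump {κ ν : Type} [BEq κ] (l : List (κ × ν)) (k : κ) (f : ν → ν) :
    (bump l k f).map Prod.fst = l.map Prod.fst := by
  induction l with
  | nil => rfl
  | cons p t ih =>
    by_cases hp : (p.1 == k) = true
    · simp [bump, hp]
    · simp [bump, hp, ih]

theorem bump_bump_same {κ ν : Type} [BEq κ] (l : List (κ × ν)) (k : κ) (f g : ν → ν) :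
    bump (bump l k f) k g = bump l k (fun v => g (f v)) := by
  induction l with
  | nil => rfl
  | cons p t ih =>
    by_cases hp : (p.1 == k) = true
    · simp [bump, hp]
    · simp [bump, hp, ih]

theorem bump_congr {κ ν : Type} [BEq κ] [LawfulBEq κ] {l : List (κ × ν)} {k : κ} {v : ν}
    (f g : ν → ν) (h : alGet? l k = some v) (hfg : f v = g v) : bump l k f = bump l k g := by
  induction l with
  | nil => rfl
  | cons p t ih =>
    by_cases hp : p.1 = k
    · simp [alGet?, hp] at h
      simp [bump, hp, h, hfg]
    · simp [alGet?, hp] at h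
      simp [bump, hp, ih h]

theorem bump_id {κ ν : Type} [BEq κ] (l : List (κ × ν)) (k : κ) :
    bump l k (fun v => v) = l := by
  induction l with
  | nil => rfl
  | cons p t ih =>
    by_cases hp : (p.1 == k) = true
    · simp [bump, hp]
    · simp [bump, hp, ih]

theorem bump_eq_map_of_nodup {κ ν : Type} [BEq κ] [LawfulBEq κ] [DecidableEq κ] {l : List (κ × ν)}
    (k : κ) (f : ν → ν) (h : (l.map Prod.fst).Nodup) :
    bump l k f = l.map (fun p => if p.1 = k then (p.1, f p.2) else p) := by
  induction l with
  | nil => rfl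
  | cons p t ih =>
    simp only [List.map_cons, List.nodup_cons] at h
    by_cases hp : p.1 = k
    · have ht : t.map (fun q => if q.1 = k then (q.1, f q.2) else q) = t := by
        conv_rhs => rw [← List.map_id t]
        apply List.map_congr_left
        intro q hq
        rw [if_neg]
        · exact (id_eq q).symm
        · intro hqk
          have hmem : q.1 ∈ t.map Prod.fst := List.mem_map_of_mem hq
          rw [hqk, ← hp] at hmem
          exact h.1 hmem
      rw [List.map_cons, if_pos hp, ht]
      simp [bump, hp]
    · simp [bump, hp, ih h.2]

theorem bump_append_of_not_mem {κ ν : Type} [BEq κ] [LawfulBEq κ] {l1 : List (κ × ν)}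
    (l2 : List (κ × ν)) (k : κ) (f : ν → ν) (h : k ∉ l1.map Prod.fst) :
    bump (l1 ++ l2) k f = l1 ++ bump l2 k f := by
  induction l1 with
  | nil => rfl
  | cons p t ih =>
    simp only [List.map_cons, List.mem_cons, not_or] at h
    have hp : ¬ p.1 = k := fun e => h.1 e.symm
    simp [bump, hp, ih h.2]

-- ---------- the running-minimum scan vs PySem.List.min? ----------

def fMin {κ : Type} (acc : Option (κ × Int)) (p : κ × Int) : Option (κ × Int) :=
  match acc with
  | none => some p
  | some m => if p.2 < m.2 then some p else some m

def fScan {κ : Type} (st : Int × Option κ) (p : κ × Int) : Int × Option κ :=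
  if p.2 < st.1 then (p.2, some p.1) else st

def initScan {κ : Type} (m0 : Int) (o : Option (κ × Int)) : Int × Option κ :=
  match o with
  | none => (m0, none)
  | some b => if b.2 < m0 then (b.2, some b.1) else (m0, none)

theorem min?_eq_fold {κ : Type} (l : List (κ × Int)) :
    PySem.List.min? l (fun kv => kv.2) = l.foldl fMin none := by
  unfold PySem.List.min?
  congr 1
  funext acc p
  cases acc <;> rfl

theorem scan_aux {κ : Type} (m0 : Int) (l : List (κ × Int)) (b : κ × Int) :
    l.foldl fScan (initScan m0 (some b)) = initScan m0 (l.foldl fMin (some b)) := by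
  induction l generalizing b with
  | nil => rfl
  | cons p t ih =>
    simp only [List.foldl_cons]
    by_cases hp : p.2 < b.2
    · have h2 : fMin (some b) p = some p := by simp [fMin, hp]
      have h1 : fScan (initScan m0 (some b)) p = initScan m0 (some p) := by
        simp only [fScan, initScan]
        split_ifs <;> first | rfl | omega
      rw [h1, h2]
      exact ih p
    · have h2 : fMin (some b) p = some b := by simp [fMin, hp]
      have h1 : fScan (initScan m0 (some b)) p = initScan m0 (some b) := by
        simp only [fScan, initScan]
        split_ifs <;> first | rfl | omega
      rw [h1, h2]
      exact ih b

theorem scan_top {κ : Type} (m0 : Int) (l : List (κ × Int)) :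
    l.foldl fScan (m0, (none : Option κ)) = initScan m0 (l.foldl fMin none) := by
  cases l with
  | nil => rfl
  | cons p t =>
    simp only [List.foldl_cons]
    rw [show fScan (m0, (none : Option κ)) p = initScan m0 (some p) from by
        simp only [fScan, initScan],
      show fMin (none : Option (κ × Int)) p = some p from rfl]
    exact scan_aux m0 t p

theorem fold_fMin_stable {κ : Type} (l : List (κ × Int)) (b : κ × Int)
    (h : ∀ y ∈ l, ¬ y.2 < b.2) : l.foldl fMin (some b) = some b := by
  induction l with
  | nil => rfl
  | cons p t ih =>
    simp only [List.foldl_cons]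
    rw [show fMin (some b) p = some b from by simp [fMin, h p (by simp)]]
    exact ih (fun y hy => h y (List.mem_cons_of_mem _ hy))

theorem fold_fMin_hit {κ : Type} (l1 : List (κ × Int)) (x : κ × Int) (l2 : List (κ × Int)) :
    ∀ (b : κ × Int), x.2 < b.2 → (∀ y ∈ l1, x.2 < y.2) → (∀ y ∈ l2, x.2 ≤ y.2) →
    (l1 ++ x :: l2).foldl fMin (some b) = some x := by
  induction l1 with
  | nil =>
    intro b hb _ h2
    simp only [List.nil_append, List.foldl_cons]
    rw [show fMin (some b) x = some x from by simp [fMin, hb]]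
    exact fold_fMin_stable l2 x (fun y hy => by have := h2 y hy; omega)
  | cons a t ih =>
    intro b hb h1 h2
    simp only [List.cons_append, List.foldl_cons]
    by_cases ha : a.2 < b.2
    · rw [show fMin (some b) a = some a from by simp [fMin, ha]]
      exact ih a (h1 a (by simp)) (fun y hy => h1 y (List.mem_cons_of_mem _ hy)) h2
    · rw [show fMin (some b) a = some b from by simp [fMin, ha]]
      exact ih b hb (fun y hy => h1 y (List.mem_cons_of_mem _ hy)) h2

theorem min?_split {κ : Type} (l1 : List (κ × Int)) (x : κ × Int) (l2 : List (κ × Int))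
    (h1 : ∀ y ∈ l1, x.2 < y.2) (h2 : ∀ y ∈ l2, x.2 ≤ y.2) :
    PySem.List.min? (l1 ++ x :: l2) (fun kv => kv.2) = some x := by
  rw [min?_eq_fold]
  cases l1 with
  | nil =>
    simp only [List.nil_append, List.foldl_cons]
    rw [show fMin (none : Option (κ × Int)) x = some x from rfl]
    exact fold_fMin_stable l2 x (fun y hy => by have := h2 y hy; omega)
  | cons a t =>
    simp only [List.cons_append, List.foldl_cons]
    rw [show fMin (none : Option (κ × Int)) a = some a from rfl]
    exact fold_fMin_hit t x l2 a (h1 a (by simp))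
      (fun y hy => h1 y (List.mem_cons_of_mem _ hy)) h2

theorem leastDayA_eq (total : List (String × Int)) (pmin : String × Int)
    (hmin : PySem.List.min? total (fun kv => kv.2) = some pmin)
    (hlt : pmin.2 < 999999999) : leastDayA total = some pmin.1 := by
  show (total.foldl fScan ((999999999 : Int), none)).2 = some pmin.1
  rw [scan_top, ← min?_eq_fold, hmin]
  simp [initScan, hlt]

-- ---------- Nat division step ----------

theorem succ_div_mod (L k : Nat) (hL : 0 < L) :
    (k % L + 1 = L → (k+1) / L = k / L + 1 ∧ (k+1) % L = 0) ∧
    (k % L + 1 ≠ L → (k+1) / L = k / L ∧ (k+1) % L = k % L + 1) := by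
  have hmod : k % L < L := Nat.mod_lt k hL
  have hdm : L * (k / L) + k % L = k := Nat.div_add_mod k L
  constructor
  · intro h
    have h1 : k + 1 = L * (k / L + 1) := by rw [Nat.mul_succ]; omega
    rw [h1, Nat.mul_div_cancel_left _ hL, Nat.mul_mod_right]
    exact ⟨rfl, rfl⟩
  · intro h
    have hlt2 : k % L + 1 < L := by omega
    have h1 : k + 1 = (k % L + 1) + L * (k / L) := by omega
    refine ⟨?_, ?_⟩
    · rw [h1, Nat.add_mul_div_left _ _ hL, Nat.div_eq_of_lt hlt2, Nat.zero_add]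
    · rw [h1, Nat.add_mul_mod_self_left, Nat.mod_eq_of_lt hlt2]

-- ---------- the round-robin counter state ----------

def rr (ts : List Int) (k : Nat) : List (Int × Int) :=
  (ts.take (k % ts.length)).map (fun t => (t, ((k / ts.length : Nat) : Int) + 1)) ++
  (ts.drop (k % ts.length)).map (fun t => (t, ((k / ts.length : Nat) : Int)))

theorem rr_zero (ts : List Int) : rr ts 0 = ts.map (fun t => (t, (0 : Int))) := by
  simp [rr]

theorem ls_rr (ts : List Int) (k : Nat) (hL : 0 < ts.length)
    (hk : ((k / ts.length : Nat) : Int) < 9999999999) :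
    leastShiftA (rr ts k) = some (ts.getD (k % ts.length) 0) := by
  have hr : k % ts.length < ts.length := Nat.mod_lt k hL
  have hd : ts.drop (k % ts.length) = ts[k % ts.length] :: ts.drop (k % ts.length + 1) :=
    List.drop_eq_getElem_cons hr
  have hgetD : ts.getD (k % ts.length) 0 = ts[k % ts.length] := List.getD_eq_getElem ts 0 hr
  have hsplit : rr ts k =
      (ts.take (k % ts.length)).map (fun t => (t, ((k / ts.length : Nat) : Int) + 1)) ++
      ((ts[k % ts.length], ((k / ts.length : Nat) : Int)) ::
        (ts.drop (k % ts.length + 1)).map (fun t => (t, ((k / ts.length : Nat) : Int)))) := by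
    rw [rr, hd, List.map_cons]
  show (List.foldl fScan ((9999999999 : Int), none) (rr ts k)).2 = _
  rw [scan_top, ← min?_eq_fold, hsplit]
  rw [min?_split _ _ _
    (by
      intro y hy
      simp only [List.mem_map] at hy
      obtain ⟨a, _, rfl⟩ := hy
      omega)
    (by
      intro y hy
      simp only [List.mem_map] at hy
      obtain ⟨a, _, rfl⟩ := hy
      omega)]
  simp only [initScan]
  rw [if_pos hk, hgetD]

theorem not_mem_take_of_nodup {ts : List Int} (hnd : ts.Nodup) {r : Nat} (hr : r < ts.length) :
    ts[r] ∉ ts.take r := by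
  intro hm
  obtain ⟨i, hi, hie⟩ := List.getElem_of_mem hm
  rw [List.getElem_take] at hie
  have hir : i < r := by have := List.length_take_le r ts; omega
  have := (List.Nodup.getElem_inj_iff hnd).mp hie
  omega

theorem rr_succ (ts : List Int) (k : Nat) (hL : 0 < ts.length) (hnd : ts.Nodup) :
    bump (rr ts k) (ts.getD (k % ts.length) 0) (· + 1) = rr ts (k+1) := by
  have hr : k % ts.length < ts.length := Nat.mod_lt k hL
  have hd : ts.drop (k % ts.length) = ts[k % ts.length] :: ts.drop (k % ts.length + 1) :=
    List.drop_eq_getElem_cons hr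
  have hgetD : ts.getD (k % ts.length) 0 = ts[k % ts.length] := List.getD_eq_getElem ts 0 hr
  have htake : ts.take (k % ts.length) ++ [ts[k % ts.length]] = ts.take (k % ts.length + 1) := by
    rw [List.take_add_one, List.getElem?_eq_getElem hr]
    rfl
  have hstep : bump (rr ts k) (ts.getD (k % ts.length) 0) (· + 1) =
      (ts.take (k % ts.length)).map (fun t => (t, ((k / ts.length : Nat) : Int) + 1)) ++
      ((ts[k % ts.length], ((k / ts.length : Nat) : Int) + 1) ::
        (ts.drop (k % ts.length + 1)).map (fun t => (t, ((k / ts.length : Nat) : Int)))) := by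
    rw [rr, hd, List.map_cons, hgetD]
    rw [bump_append_of_not_mem _ _ _ (by
      simp only [List.map_map]
      intro hm
      obtain ⟨a, ha, hae⟩ := List.mem_map.mp hm
      have haa : a = ts[k % ts.length] := hae
      exact not_mem_take_of_nodup hnd hr (haa ▸ ha))]
    congr 1
    simp [bump]
  rw [hstep]
  by_cases hc : k % ts.length + 1 = ts.length
  · have h1 := (succ_div_mod ts.length k hL).1 hc
    have hdrop : ts.drop (k % ts.length + 1) = [] := by
      rw [List.drop_eq_nil_iff]; omega
    rw [rr, h1.1, h1.2, hdrop]
    simp only [List.map_nil, List.take_zero, List.drop_zero, List.nil_append,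
      Nat.cast_add, Nat.cast_one]
    rw [show ((ts.take (k % ts.length)).map
        (fun t => (t, ((k / ts.length : Nat) : Int) + 1)) ++
        [(ts[k % ts.length], ((k / ts.length : Nat) : Int) + 1)]) =
        ((ts.take (k % ts.length) ++ [ts[k % ts.length]]).map
          (fun t => (t, ((k / ts.length : Nat) : Int) + 1))) from by
      rw [List.map_append]; rfl]
    rw [htake, hc, List.take_length]
  · have h1 := (succ_div_mod ts.length k hL).2 hc
    rw [rr, h1.1, h1.2, ← htake, List.map_append]
    rw [List.append_assoc]
    rfl

-- ---------- the abstract per-step recursion (A's loop after phase 1) ----------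

def bumps (d : String) (ts : List Int) :
    Nat → Nat → List (String × List (Int × Int)) → List (String × List (Int × Int))
  | 0, _, ds => ds
  | n+1, k, ds =>
    bumps d ts n (k+1) (bump ds d (fun sh => bump sh (ts.getD (k % ts.length) 0) (· + 1)))

def cnt (ts : List Int) : Nat → Nat → Int → Int
  | 0, _, _ => 0
  | n+1, k, s => (if ts.getD (k % ts.length) 0 = s then 1 else 0) + cnt ts n (k+1) s

theorem loopA_eq_bumps (total : List (String × Int)) (d : String) (ts : List Int)
    (hday : leastDayA total = some d) (hL : 0 < ts.length) (hnd : ts.Nodup) :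
    ∀ (n k : Nat) (ds pot : List (String × List (Int × Int))),
      k + n ≤ 2147483648 → alGet? pot d = some (rr ts k) →
      loopA total n ds pot = bumps d ts n k ds := by
  intro n
  induction n with
  | zero => intro k ds pot _ _; rfl
  | succ n ih =>
    intro k ds pot hb hpot
    have hq : ((k / ts.length : Nat) : Int) < 9999999999 := by
      have h1 : k / ts.length ≤ k := Nat.div_le_self k ts.length
      have h2 : k / ts.length ≤ 2147483648 := by omega
      omega
    rw [loopA, hday]
    simp only [hpot, Option.getD_some, ls_rr ts k hL hq]
    rw [show bumps d ts (n+1) k ds =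
        bumps d ts n (k+1) (bump ds d (fun sh => bump sh (ts.getD (k % ts.length) 0) (· + 1)))
      from rfl]
    exact ih (k+1) _ _ (by omega) (by
      rw [alGet?_bump_self, hpot]
      simp only [Option.map_some]
      rw [rr_succ ts k hL hnd])

theorem bumps_eq (d : String) (ts : List Int) :
    ∀ (n k : Nat) (ds : List (String × List (Int × Int))) (sh : List (Int × Int)),
      alGet? ds d = some sh → (sh.map Prod.fst).Nodup →
      bumps d ts n k ds =
        bump ds d (fun s0 => s0.map (fun p => (p.1, p.2 + cnt ts n k p.1))) := by
  intro n
  induction n with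
  | zero =>
    intro k ds sh hsh _
    rw [show bumps d ts 0 k ds = ds from rfl]
    rw [bump_congr _ (fun v => v) hsh (by simp [cnt]), bump_id]
  | succ n ih =>
    intro k ds sh hsh hnd
    rw [show bumps d ts (n+1) k ds =
        bumps d ts n (k+1) (bump ds d (fun sh => bump sh (ts.getD (k % ts.length) 0) (· + 1)))
      from rfl]
    rw [ih (k+1) _ (bump sh (ts.getD (k % ts.length) 0) (· + 1))
      (by rw [alGet?_bump_self, hsh]; rfl)
      (by rw [keys_bump]; exact hnd)]
    rw [bump_bump_same]
    apply bump_congr _ _ hsh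
    rw [bump_eq_map_of_nodup _ _ hnd, List.map_map]
    apply List.map_congr_left
    intro p _
    simp only [Function.comp_apply]
    rw [show cnt ts (n+1) k p.1 =
        (if ts.getD (k % ts.length) 0 = p.1 then 1 else 0) + cnt ts n (k+1) p.1 from rfl]
    by_cases hp : p.1 = ts.getD (k % ts.length) 0
    · rw [if_pos hp, if_pos hp.symm]
      simp only [Prod.mk.injEq]
      exact ⟨trivial, by ring⟩
    · rw [if_neg hp, if_neg (fun e => hp e.symm)]
      simp only [Prod.mk.injEq]
      exact ⟨trivial, by ring⟩

-- ---------- B's enumerate-fold as a map ----------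

def cntB (amt : Int → Int) : List Int → Int → Int → Int
  | [], _, _ => 0
  | t :: r, i0, s => (if t = s then amt i0 else 0) + cntB amt r (i0+1) s

theorem enumFold_eq_map (amt : Int → Int) :
    ∀ (ts : List Int) (i0 : Int) (sh : List (Int × Int)), (sh.map Prod.fst).Nodup →
      (PySem.List.enumerate ts i0).foldl
          (fun sh p => bump sh p.2 (fun v => v + amt p.1)) sh
        = sh.map (fun p => (p.1, p.2 + cntB amt ts i0 p.1)) := by
  intro ts
  induction ts with
  | nil =>
    intro i0 sh _
    simp [PySem.List.enumerate, cntB]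
  | cons t r ih =>
    intro i0 sh hnd
    rw [PySem.List.enumerate_cons, List.foldl_cons]
    rw [ih (i0+1) (bump sh t (fun v => v + amt i0))
      (by rw [keys_bump]; exact hnd)]
    rw [bump_eq_map_of_nodup _ _ hnd, List.map_map]
    apply List.map_congr_left
    intro p _
    simp only [Function.comp_apply]
    rw [show cntB amt (t :: r) i0 p.1 =
        (if t = p.1 then amt i0 else 0) + cntB amt r (i0+1) p.1 from rfl]
    by_cases hp : p.1 = t
    · rw [if_pos hp, if_pos hp.symm]
      simp only [Prod.mk.injEq]
      exact ⟨trivial, by ring⟩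
    · rw [if_neg hp, if_neg (fun e => hp e.symm)]
      simp only [Prod.mk.injEq]
      exact ⟨trivial, by ring⟩

-- ---------- the closed form: how often index i is hit in N round-robin steps ----------

def Efun (ts : List Int) (m : Nat) (s : Int) : Int :=
  if s ∈ ts then
    ((m / ts.length : Nat) : Int) + (if ts.idxOf s < m % ts.length then 1 else 0)
  else 0

theorem Efun_zero (ts : List Int) (s : Int) : Efun ts 0 s = 0 := by
  simp [Efun]

theorem Efun_succ (ts : List Int) (hL : 0 < ts.length) (hnd : ts.Nodup) (k : Nat) (s : Int) :
    Efun ts (k+1) s = Efun ts k s + (if ts.getD (k % ts.length) 0 = s then 1 else 0) := by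
  have hr : k % ts.length < ts.length := Nat.mod_lt k hL
  have hgetD : ts.getD (k % ts.length) 0 = ts[k % ts.length] := List.getD_eq_getElem ts 0 hr
  by_cases hm : s ∈ ts
  · have hi : ts.idxOf s < ts.length := List.idxOf_lt_length_of_mem hm
    have hidx : ts[ts.idxOf s] = s := List.getElem_idxOf hi
    have hiff : ts[k % ts.length] = s ↔ k % ts.length = ts.idxOf s := by
      constructor
      · intro he
        exact (List.Nodup.getElem_inj_iff hnd).mp (by rw [he, hidx])
      · intro he
        simp only [he]
        exact hidx
    rw [hgetD]
    by_cases hc : k % ts.length + 1 = ts.length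
    · have h1 := (succ_div_mod ts.length k hL).1 hc
      simp only [Efun, if_pos hm, h1.1, h1.2, hiff]
      push_cast
      split_ifs <;> omega
    · have h1 := (succ_div_mod ts.length k hL).2 hc
      simp only [Efun, if_pos hm, h1.1, h1.2, hiff]
      split_ifs <;> omega
  · have hne : ts[k % ts.length] ≠ s := fun e => hm (e ▸ List.getElem_mem hr)
    simp only [Efun, if_neg hm]
    rw [hgetD, if_neg hne]
    ring

theorem cnt_eq_Ediff (ts : List Int) (hL : 0 < ts.length) (hnd : ts.Nodup) :
    ∀ (n k : Nat) (s : Int), cnt ts n k s = Efun ts (k+n) s - Efun ts k s := by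
  intro n
  induction n with
  | zero =>
    intro k s
    rw [show cnt ts 0 k s = 0 from rfl]
    simp only [Nat.add_zero]
    omega
  | succ n ih =>
    intro k s
    rw [show cnt ts (n+1) k s =
        (if ts.getD (k % ts.length) 0 = s then 1 else 0) + cnt ts n (k+1) s from rfl]
    rw [ih (k+1) s]
    have h1 := Efun_succ ts hL hnd k s
    have h2 : k + 1 + n = k + (n + 1) := by omega
    rw [h2]
    omega

theorem cntB_zero_of_not_mem (amt : Int → Int) :
    ∀ (l : List Int) (i0 : Int) (s : Int), s ∉ l → cntB amt l i0 s = 0 := by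
  intro l
  induction l with
  | nil => intro i0 s _; rfl
  | cons t r ih =>
    intro i0 s hs
    simp only [List.mem_cons, not_or] at hs
    rw [show cntB amt (t :: r) i0 s = (if t = s then amt i0 else 0) + cntB amt r (i0+1) s
      from rfl]
    rw [if_neg (fun e => hs.1 e.symm), ih (i0+1) s hs.2]
    ring

theorem cntB_char (amt : Int → Int) :
    ∀ (l : List Int) (j : Nat) (s : Int), l.Nodup →
      cntB amt l (j : Int) s = if s ∈ l then amt ((j + l.idxOf s : Nat) : Int) else 0 := by
  intro l
  induction l with
  | nil => intro j s _; simp [cntB]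
  | cons t r ih =>
    intro j s hnd
    simp only [List.nodup_cons] at hnd
    rw [show cntB amt (t :: r) (j : Int) s =
        (if t = s then amt (j : Int) else 0) + cntB amt r ((j : Int)+1) s from rfl]
    by_cases ht : t = s
    · rw [if_pos ht, cntB_zero_of_not_mem amt r _ s (ht ▸ hnd.1)]
      rw [if_pos (by simp [← ht]), ← ht, List.idxOf_cons_self]
      simp
    · rw [if_neg ht,
        show ((j : Int) + 1) = ((j + 1 : Nat) : Int) from by push_cast; ring,
        ih (j+1) s hnd.2]
      by_cases hs : s ∈ r
      · rw [if_pos hs, if_pos (List.mem_cons_of_mem _ hs),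
          List.idxOf_cons_ne _ (fun e => ht e)]
        rw [show j + 1 + r.idxOf s = j + (r.idxOf s + 1) from by omega]
        ring
      · rw [if_neg hs, if_neg (by
          simp only [List.mem_cons, not_or]
          exact ⟨fun e => ht e.symm, hs⟩)]
        ring

theorem final_cnt_eq (ts : List Int) (hL : 0 < ts.length) (hnd : ts.Nodup) (N : Nat) (s : Int) :
    cnt ts N 0 s =
      cntB (fun i => ((N / ts.length : Nat) : Int) +
        if i < ((N % ts.length : Nat) : Int) then 1 else 0) ts 0 s := by
  rw [cnt_eq_Ediff ts hL hnd N 0 s, Efun_zero]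
  rw [show (0 : Int) = ((0 : Nat) : Int) from rfl, cntB_char _ ts 0 s hnd]
  simp only [Efun, Nat.zero_add]
  by_cases hm : s ∈ ts
  · rw [if_pos hm, if_pos hm]
    split_ifs <;> omega
  · rw [if_neg hm, if_neg hm]
    ring

-- ---------- A's potential dict ----------

theorem usable_eq (sq : Int × Int) :
    (!(sq.2 == 0 || (22 ≤ sq.1 && sq.1 < 24) || (0 ≤ sq.1 && sq.1 < 6))) = usable sq := by
  rw [Bool.eq_iff_iff]
  simp [usable]
  omega

theorem potentialOf_eq (sh : List (Int × Int)) :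
    potentialOf sh = (sh.filter usable).map (fun sq => (sq.1, (0 : Int))) := by
  rw [potentialOf]
  rw [show (fun (acc : List (Int × Int)) (sq : Int × Int) =>
      if sq.2 == 0 || (22 ≤ sq.1 && sq.1 < 24) || (0 ≤ sq.1 && sq.1 < 6) then acc
      else acc ++ [(sq.1, (0 : Int))]) =
      (fun (acc : List (Int × Int)) (sq : Int × Int) =>
        if (!(sq.2 == 0 || (22 ≤ sq.1 && sq.1 < 24) || (0 ≤ sq.1 && sq.1 < 6)))
        then acc ++ [(sq.1, (0 : Int))] else acc) from by
    funext acc sq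
    cases hb : (sq.2 == 0 || (22 ≤ sq.1 && sq.1 < 24) || (0 ≤ sq.1 && sq.1 < 6)) <;> simp [hb]]
  rw [PySem.List.foldl_append_if]
  rw [List.filter_congr (fun sq _ => usable_eq sq)]
  simp

-- ===== VERDICT (by name: the statement is the Claim_ definition above) =====
theorem generate_targeted_random_shifts_to_add_spec : Claim_equal_generate_targeted_random_shifts_to_add := by
  intro s total ds hdom hpre
  unfold Spec_generate_targeted_random_shifts_to_add
  by_cases hs : s ≤ 0
  · rw [generate_targeted_random_shifts_to_add, generate_targeted_random_shifts_to_add_alt,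
      Int.toNat_of_nonpos hs, if_pos hs]
    rfl
  · have hpos : 0 < s := by omega
    rcases hpre with hle | ⟨hndT, hndD, hndSub, ⟨pw, hpw, hpwlt⟩, hfilt⟩
    · omega
    obtain ⟨pmin, hmin⟩ : ∃ pmin, PySem.List.min? total (fun kv => kv.2) = some pmin := by
      cases h : PySem.List.min? total (fun kv => kv.2) with
      | none => rw [PySem.List.min?_eq_none_iff] at h; subst h; simp at hpw
      | some p => exact ⟨p, rfl⟩
    have hlt : pmin.2 < 999999999 :=
      lt_of_le_of_lt (PySem.List.min?_isMin hmin pw hpw) hpwlt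
    have hday : leastDayA total = some pmin.1 := leastDayA_eq total pmin hmin hlt
    obtain ⟨q, hqmem, hqeq, hfilt⟩ := hfilt
    rw [hmin] at hqeq
    have hq1 : q.1 = pmin.1 := by simpa using hqeq
    set sh0 := q.2 with hsh0def
    have hmemds : (pmin.1, sh0) ∈ ds := by
      rw [← hq1]
      exact hqmem
    have hsh0 : alGet? ds pmin.1 = some sh0 := alGet?_eq_of_mem_nodup hndD hmemds
    have hkeys : (sh0.map Prod.fst).Nodup := hndSub (pmin.1, sh0) hmemds
    set ts := (sh0.filter usable).map (fun sq : Int × Int => sq.1) with hts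
    have htsfst : ts = (sh0.filter usable).map Prod.fst := rfl
    have hL : 0 < ts.length := by
      rw [hts, List.length_map]
      exact List.length_pos_of_ne_nil hfilt
    have hndts : ts.Nodup := by
      rw [htsfst]
      exact hkeys.sublist (List.Sublist.map Prod.fst List.filter_sublist)
    have hNbound : s.toNat ≤ 2147483648 := by
      unfold Dom_generate_targeted_random_shifts_to_add at hdom
      simp only [Bool.and_eq_true, pvDomInt, decide_eq_true_eq] at hdom
      omega
    obtain ⟨N, rfl⟩ : ∃ N : Nat, s = (N : Int) :=
      ⟨s.toNat, (Int.toNat_of_nonneg (by omega)).symm⟩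
    simp only [Int.toNat_natCast] at hNbound
    have hTS : (sh0.filter (fun sq =>
        decide (sq.2 ≠ 0 ∧ ¬(0 ≤ sq.1 ∧ sq.1 < 6) ∧ ¬(22 ≤ sq.1 ∧ sq.1 < 24)))).map
        (fun x => x.1) = ts := by
      rw [hts]
      rfl
    -- A side: build the potential dict, then phases 1 and 2
    rw [generate_targeted_random_shifts_to_add]
    rw [show ds.foldl (fun acc p => acc ++ [(p.1, potentialOf p.2)]) [] =
        ds.map (fun p => (p.1, potentialOf p.2)) from by
      rw [PySem.List.foldl_append_singleton_eq_map]; simp]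
    have hpot0 : alGet? (ds.map (fun p => (p.1, potentialOf p.2))) pmin.1 = some (rr ts 0) := by
      rw [alGet?_map, hsh0]
      simp only [Option.map_some]
      congr 1
      rw [potentialOf_eq, rr_zero, hts, List.map_map]
      rfl
    rw [show ((N : Int)).toNat = N from Int.toNat_natCast N]
    rw [loopA_eq_bumps total pmin.1 ts hday hL hndts N 0 ds _ (by omega) hpot0]
    rw [bumps_eq pmin.1 ts N 0 ds sh0 hsh0 hkeys]
    -- B side
    rw [generate_targeted_random_shifts_to_add_alt, if_neg hs, hmin]
    simp only [hsh0, Option.getD_some]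
    rw [hTS]
    simp only [PySem.Int.floordiv_natCast, PySem.Int.mod_natCast]
    apply bump_congr _ _ hsh0
    rw [enumFold_eq_map
      (fun i => ((N / ts.length : Nat) : Int) +
        if i < ((N % ts.length : Nat) : Int) then 1 else 0) ts 0 sh0 hkeys]
    apply List.map_congr_left
    intro p _
    rw [final_cnt_eq ts hL hndts N p.1]
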